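-- pv_equiv track=rewrite | github.com/Aleksey6578/RAG-System | rpd_generate.py | _normalize_section_assignment
-- ===== SOURCE A (Python) =====
-- def _normalize_section_assignment(items: list, n_sections: int) -> list:
--     """
--     [Фикс Д-SecRot] Принудительно перезаписывает поле 'section' по
--     детерминированному паттерну 1,1,...,2,2,...,3,3,...
--
--     Устраняет ошибки LLM при назначении раздела — например, когда модель
--     возвращает section:1 для 4-го ПЗ вместо ожидаемого section:2.
--     Вызывается после gen_with_json_retry для lab_works и practice.
--     """
--     if n_sections < 1 or not items:
--         return items
--     n = len(items)
--     per_sec = max(1, n // n_sections)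
--     for i, item in enumerate(items):
--         if isinstance(item, dict):
--             item["section"] = min((i // per_sec) + 1, n_sections)
--     return items
-- ===== SOURCE B (Python) =====
-- def _normalize_section_assignment(items: list, n_sections: int) -> list:
--     # Blockwise: build the label sequence section-by-section (per_sec labels per
--     # section, the last section absorbing the remainder), then zip it onto the
--     # items.  Mutates the dict items in place and returns the same list, like A.
--     if n_sections < 1 or not items:
--         return items
--     n = len(items)
--     per_sec = max(1, n // n_sections)
--     labels = []
--     s = 1
--     rem = n
--     while rem > 0:
--         if s == n_sections:
--             labels.extend([s] * rem)
--             rem = 0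
--         else:
--             take = min(per_sec, rem)
--             labels.extend([s] * take)
--             rem -= take
--             s += 1
--     for item, lab in zip(items, labels):
--         if isinstance(item, dict):
--             item["section"] = lab
--     return items
-- ===== Notes on version B (the rewrite author's own statement) =====
-- stated objective: alternative
-- what changed: Instead of computing min(i//per_sec+1, n_sections) per index, B generates the section labels block by block (per_sec copies of each section number, the last section absorbing the remainder) and zips them onto the items.
import Mathlib
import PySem

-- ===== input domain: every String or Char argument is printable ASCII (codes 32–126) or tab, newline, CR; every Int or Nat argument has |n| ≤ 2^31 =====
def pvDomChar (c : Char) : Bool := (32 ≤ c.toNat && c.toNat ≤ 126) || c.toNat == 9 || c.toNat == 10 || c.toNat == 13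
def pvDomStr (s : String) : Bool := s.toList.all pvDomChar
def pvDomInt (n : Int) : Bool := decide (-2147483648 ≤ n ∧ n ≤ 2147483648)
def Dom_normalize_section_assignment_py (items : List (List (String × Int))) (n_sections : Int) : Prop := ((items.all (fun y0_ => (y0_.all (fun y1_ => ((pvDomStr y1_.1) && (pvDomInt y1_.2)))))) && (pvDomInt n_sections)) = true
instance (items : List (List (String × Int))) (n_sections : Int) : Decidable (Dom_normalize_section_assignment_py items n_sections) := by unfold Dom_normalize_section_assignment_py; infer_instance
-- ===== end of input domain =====

-- B builds the section labels block by block (per_sec copies of each section number,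
-- the last section absorbing the remainder) and zips them onto the items, instead of
-- A's per-index formula min(i//per_sec+1, n_sections); same cost ('alternative').
-- Both Pythons mutate the dict items of the argument list in place and return the
-- same list object; the equivalence proved here is about the return value.

-- ===== PORT A =====
def normalize_section_assignment_py (items : List (List (String × Int))) (n_sections : Int) : List (List (String × Int)) :=
  if n_sections < 1 ∨ items = [] then items
  else
    let n : Int := (items.length : Int)
    let per_sec : Int := max 1 (PySem.Int.floordiv n n_sections)
    -- every item has type dict here, so A's `isinstance(item, dict)` test is always true
    (PySem.List.enumerate items).map (fun p =>
      ((PySem.Dict.mk p.2).insert "section" (min (PySem.Int.floordiv p.1 per_sec + 1) n_sections)).items)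

-- ===== PORT B =====
-- B's while loop building `labels`: one recursive step per section number s.
def pvMkLabels (per_sec n_sections : Int) (s : Int) (rem : Nat) : List Int :=
  if rem = 0 then []
  else if s = n_sections then List.replicate rem n_sections
  else
    if min per_sec.toNat rem = 0 then []   -- totality guard only; at the call site per_sec ≥ 1 and rem ≥ 1
    else List.replicate (min per_sec.toNat rem) s ++
      pvMkLabels per_sec n_sections (s + 1) (rem - min per_sec.toNat rem)
termination_by rem
decreasing_by omega

def normalize_section_assignment_py_alt (items : List (List (String × Int))) (n_sections : Int) : List (List (String × Int)) :=
  if n_sections < 1 ∨ items = [] then items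
  else
    let n : Nat := items.length
    let per_sec : Int := max 1 (PySem.Int.floordiv (n : Int) n_sections)
    let labels : List Int := pvMkLabels per_sec n_sections 1 n
    -- every item has type dict here, so B's `isinstance(item, dict)` test is always true
    (items.zip labels).map (fun p => ((PySem.Dict.mk p.1).insert "section" p.2).items)

-- ===== PRECONDITION & SPEC =====
def Spec_normalize_section_assignment_py (items : List (List (String × Int))) (n_sections : Int) (out : List (List (String × Int))) : Prop := out = normalize_section_assignment_py_alt items n_sections
instance (items : List (List (String × Int))) (n_sections : Int) (out : List (List (String × Int))) : Decidable (Spec_normalize_section_assignment_py items n_sections out) := by unfold Spec_normalize_section_assignment_py; infer_instance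

-- ===== CLAIM (what is proved, stated in full; the proofs are below) =====
def Claim_equal_normalize_section_assignment_py : Prop := ∀ (items : List (List (String × Int))) (n_sections : Int), Dom_normalize_section_assignment_py items n_sections → Spec_normalize_section_assignment_py items n_sections (normalize_section_assignment_py items n_sections)

-- ===== LEMMAS AND PROOFS =====

theorem pvMkLabels_length (p ns s : Int) (rem : Nat) (hp : 1 ≤ p) :
    (pvMkLabels p ns s rem).length = rem := by
  induction rem using Nat.strong_induction_on generalizing s with
  | _ rem ih =>
    rw [pvMkLabels]
    split_ifs with h0 hs ht
    · simp [h0]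
    · simp
    · exfalso; omega
    · have htk : min p.toNat rem ≥ 1 := by omega
      rw [List.length_append, List.length_replicate,
        ih (rem - min p.toNat rem) (by omega) (s + 1)]
      omega

theorem pvMkLabels_get (p ns s : Int) (rem j : Nat) (hp : 1 ≤ p) (hs : s ≤ ns)
    (hj : j < rem) :
    (pvMkLabels p ns s rem)[j]? = some (min (((j / p.toNat : Nat) : Int) + s) ns) := by
  induction rem using Nat.strong_induction_on generalizing s j with
  | _ rem ih =>
    rw [pvMkLabels]
    split_ifs with h0 hseq ht
    · omega
    · subst hseq
      rw [List.getElem?_replicate]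
      have h1 : (0 : Int) ≤ ((j / p.toNat : Nat) : Int) := Int.natCast_nonneg _
      rw [if_pos hj]
      congr 1
      omega
    · exfalso; omega
    · have hpn : 1 ≤ p.toNat := by omega
      have htk : 1 ≤ min p.toNat rem := by omega
      by_cases hlt : j < min p.toNat rem
      · rw [List.getElem?_append_left (by simpa using hlt), List.getElem?_replicate,
          if_pos hlt]
        have hdiv : j / p.toNat = 0 := Nat.div_eq_of_lt (by omega)
        have hslt : s < ns := lt_of_le_of_ne hs hseq
        rw [hdiv]
        congr 1
        simp
        omega
      · -- j ≥ take; since j < rem, take = p.toNat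
        have hpr : p.toNat ≤ rem := by omega
        have htake : min p.toNat rem = p.toNat := by omega
        rw [List.getElem?_append_right (by simp; omega)]
        have hrec := ih (rem - min p.toNat rem) (by omega) (s + 1) (j - p.toNat)
          (by omega) (by omega)
        rw [htake] at hrec
        simp only [List.length_replicate, htake]
        rw [hrec]
        have hdiv : j / p.toNat = (j - p.toNat) / p.toNat + 1 :=
          Nat.div_eq_sub_div (by omega) (by omega)
        rw [hdiv]
        congr 2
        push_cast
        ring

-- ===== VERDICT (by name: the statement is the Claim_ definition above) =====
theorem normalize_section_assignment_py_spec : Claim_equal_normalize_section_assignment_py := by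
  intro items ns _
  unfold Spec_normalize_section_assignment_py
  unfold normalize_section_assignment_py normalize_section_assignment_py_alt
  by_cases hg : ns < 1 ∨ items = []
  · simp [hg]
  · simp only [if_neg hg]
    rw [not_or] at hg
    obtain ⟨hns, hne⟩ := hg
    have hns1 : 1 ≤ ns := by omega
    set p : Int := max 1 (PySem.Int.floordiv (items.length : Int) ns) with hpdef
    have hp : 1 ≤ p := le_max_left _ _
    have hlab : (pvMkLabels p ns 1 items.length).length = items.length :=
      pvMkLabels_length p ns 1 items.length hp
    apply List.ext_getElem
    · simp [PySem.List.length_enumerate, hlab]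
    · intro j hj1 hj2
      simp only [List.getElem_map, PySem.List.getElem_enumerate, List.getElem_zip]
      have hjlen : j < items.length := by
        simpa [PySem.List.length_enumerate] using hj1
      congr 1
      -- labels[j] = min (j / p.toNat + 1) ns = min (j // p + 1) ns
      have hget := pvMkLabels_get p ns 1 items.length j hp hns1 hjlen
      have hzlen : j < (items.zip (pvMkLabels p ns 1 items.length)).length := by
        simpa [hlab] using hj2
      have hgj : (pvMkLabels p ns 1 items.length)[j]'(by omega) =
          min (((j / p.toNat : Nat) : Int) + 1) ns := by
        have := List.getElem?_eq_getElem (l := pvMkLabels p ns 1 items.length)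
          (i := j) (by omega)
        rw [this] at hget
        exact Option.some.inj hget
      rw [hgj]
      have hpc : p = ((p.toNat : Nat) : Int) := (Int.toNat_of_nonneg (by omega)).symm
      have hfd : PySem.Int.floordiv ((0 : Int) + (j : Int)) p = ((j / p.toNat : Nat) : Int) := by
        rw [zero_add]
        conv_lhs => rw [hpc]
        rw [PySem.Int.floordiv_natCast]
      rw [hfd]
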